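-- pv_equiv track=rewrite | github.com/nick24github/python_code | DSA_coding_question/ques4.py | min_penalty
-- ===== SOURCE A (Python) =====
-- def min_penalty(size, arr):
--     if size < 2:
--         return 0
--
--     # Initialize the penalty array
--     penalty = [[float('inf')] * 101 for _ in range(size)]
--
--     # Base case: for the first element
--     for j in range(101):
--         penalty[0][j] = abs(arr[0] - j)
--
--     # Fill the penalty array
--     for i in range(1, size):
--         for j in range(101):
--             for k in range(101):
--                 penalty[i][j] = min(penalty[i][j], penalty[i-1][k] + abs(j - arr[i]))
--
--     # Find the minimum penalty in the last row
--     min_penalty = float('inf')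
--     for j in range(101):
--         min_penalty = min(min_penalty, penalty[size-1][j])
--
--     return min_penalty
-- ===== SOURCE B (Python) =====
-- def min_penalty(size, arr):
--     if size < 2:
--         return 0
--     return sum(max(max(0, -x), x - 100) for x in arr[:size])
-- ===== Notes on version B (the rewrite author's own statement) =====
-- stated objective: faster
-- what changed: Replaced the size x 101 DP table with its 101 x 101 transition per row (which always resolves to min-of-previous-row plus the element's distance to [0,100]) by a single pass summing each element's closed-form distance max(max(0,-x), x-100) over arr[:size].
import Mathlib
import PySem

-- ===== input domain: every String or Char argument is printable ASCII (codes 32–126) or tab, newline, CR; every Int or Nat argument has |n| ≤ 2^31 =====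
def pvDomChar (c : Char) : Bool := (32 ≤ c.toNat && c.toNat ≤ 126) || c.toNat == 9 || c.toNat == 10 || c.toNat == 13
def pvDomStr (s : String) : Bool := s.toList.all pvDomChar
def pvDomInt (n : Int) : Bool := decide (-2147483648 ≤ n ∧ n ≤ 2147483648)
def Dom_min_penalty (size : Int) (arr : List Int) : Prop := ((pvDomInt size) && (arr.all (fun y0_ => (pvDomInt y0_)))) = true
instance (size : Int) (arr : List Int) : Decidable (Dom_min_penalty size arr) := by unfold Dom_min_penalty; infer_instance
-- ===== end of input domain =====

-- B replaces A's size×101 DP table (101×101 transition work per row) by a single pass summing each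
-- element's distance to [0,100] in closed form; measurably faster by a large constant factor.

-- ===== PORT A =====
-- min with float('inf') modelled as `none`
def pvInfMin (cur v : Option Int) : Option Int :=
  match cur, v with
  | none, v => v
  | some a, none => some a
  | some a, some b => some (min a b)

-- penalty[i-1][k] + abs(j - arr[i]) : inf + d = inf
def pvAddInf (p : Option Int) (d : Int) : Option Int := p.map (· + d)

def min_penalty (size : Int) (arr : List Int) : Int :=
  if size < 2 then 0
  else
    let n := size.toNat
    let a0 := (PySem.List.pyGet? arr 0).getD 0          -- arr[0]; Pre_ guarantees in range
    let row0 : List (Option Int) := (List.range 101).map (fun (j : Nat) => some |a0 - (j : Int)|)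
    let table : List (List (Option Int)) :=
      (List.range' 1 (n - 1)).foldl
        (fun (tbl : List (List (Option Int))) (i : Nat) =>
          let ai := (PySem.List.pyGet? arr (i : Int)).getD 0   -- arr[i]; Pre_ guarantees in range
          let prev := tbl.getD (i - 1) []
          tbl ++ [(List.range 101).map (fun (j : Nat) =>
            (List.range 101).foldl
              (fun cur (k : Nat) => pvInfMin cur (pvAddInf (prev.getD k none) |(j : Int) - ai|)) none)])
        [row0]
    let last := table.getD (n - 1) []
    ((List.range 101).foldl (fun cur (j : Nat) => pvInfMin cur (last.getD j none)) none).getD 0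

-- ===== PORT B =====
def min_penalty_alt (size : Int) (arr : List Int) : Int :=
  if size < 2 then 0
  else ((PySem.List.slice arr (some 0) (some size)).map (fun x => max (max 0 (-x)) (x - 100))).sum

-- ===== PRECONDITION & SPEC =====
-- Pre_ excludes exactly the inputs where A raises IndexError: size ≥ 2 with fewer than size elements.
def Pre_min_penalty (size : Int) (arr : List Int) : Prop := size < 2 ∨ size ≤ (arr.length : Int)
instance (size : Int) (arr : List Int) : Decidable (Pre_min_penalty size arr) := by
  unfold Pre_min_penalty; infer_instance

def pvWitness_min_penalty : Int × List Int := (3, [0, -5, 120])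

def Spec_min_penalty (size : Int) (arr : List Int) (out : Int) : Prop := out = min_penalty_alt size arr
instance (size : Int) (arr : List Int) (out : Int) : Decidable (Spec_min_penalty size arr out) := by
  unfold Spec_min_penalty; infer_instance

-- ===== CLAIM (what is proved, stated in full; the proofs are below) =====
def Claim_equal_min_penalty : Prop := ∀ (size : Int) (arr : List Int), Dom_min_penalty size arr → Pre_min_penalty size arr → Spec_min_penalty size arr (min_penalty size arr)

-- ===== LEMMAS AND PROOFS =====

-- closed-form distance of x to [0,100] (B's per-element term)
def gd (x : Int) : Int := max (max 0 (-x)) (x - 100)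

-- shape of every computed DP row: cell j holds some (c + |j - a|)
def pvShape (c a : Int) : List (Option Int) :=
  (List.range 101).map (fun (j : Nat) => some (c + |(j : Int) - a|))

def pvArrAt (arr : List Int) (t : Nat) : Int := (PySem.List.pyGet? arr ((t : Nat) : Int)).getD 0

def pvSum (arr : List Int) (t : Nat) : Int := ((arr.take t).map gd).sum

lemma pvArrAt_eq (arr : List Int) (t : Nat) (ht : t < arr.length) : pvArrAt arr t = arr[t] := by
  simp [pvArrAt, PySem.List.pyGet?_natCast, List.getElem?_eq_getElem ht]

lemma pvSum_succ (arr : List Int) (t : Nat) (ht : t < arr.length) :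
    pvSum arr (t + 1) = pvSum arr t + gd (pvArrAt arr t) := by
  unfold pvSum
  rw [List.take_add_one, List.getElem?_eq_getElem ht, List.map_append, List.sum_append]
  simp [pvArrAt_eq arr t ht]

lemma pvShape_getD (c a : Int) (k : Nat) (hk : k < 101) :
    (pvShape c a).getD k none = some (c + |(k : Int) - a|) := by
  simp [pvShape, List.getD_eq_getElem?_getD, List.getElem?_map, List.getElem?_range hk]

lemma gd_le (a k : Int) (h0 : 0 ≤ k) (h1 : k ≤ 100) : gd a ≤ |k - a| := by
  rcases abs_cases (k - a) with ⟨he, _⟩ | ⟨he, _⟩ <;> rw [he] <;> simp [gd] <;> omega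

lemma foldl_min_eq (l : List Nat) (f : Nat → Int) (b m : Int)
    (hb : m ≤ b) (hl : ∀ k ∈ l, m ≤ f k) (hmem : m = b ∨ ∃ k ∈ l, f k = m) :
    l.foldl (fun c k => min c (f k)) b = m := by
  induction l generalizing b with
  | nil =>
    rcases hmem with h | ⟨k, hk, _⟩
    · exact h.symm
    · simp at hk
  | cons k t ih =>
    simp only [List.foldl_cons]
    apply ih
    · exact le_min hb (hl k (by simp))
    · intro x hx; exact hl x (by simp [hx])
    · rcases hmem with h | ⟨x, hx, hfx⟩
      · left; subst h; exact (min_eq_left (hl k (by simp))).symm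
      · rcases List.mem_cons.mp hx with h | h
        · subst h; left; rw [hfx]; exact (min_eq_right hb).symm
        · right; exact ⟨x, h, hfx⟩

lemma foldl_infMin_some (l : List Nat) (f : Nat → Int) (b : Int) :
    l.foldl (fun cur k => pvInfMin cur (some (f k))) (some b)
      = some (l.foldl (fun c k => min c (f k)) b) := by
  induction l generalizing b with
  | nil => rfl
  | cons k t ih => simp only [List.foldl_cons, pvInfMin]; exact ih (min b (f k))

lemma foldl_shape_min (c a : Int) (f : Nat → Int)
    (hf : ∀ k, k < 101 → f k = c + |(k : Int) - a|) :
    (List.range 101).foldl (fun cur k => pvInfMin cur (some (f k))) none = some (c + gd a) := by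
  have h101 : List.range 101 = 0 :: List.range' 1 100 := by rfl
  rw [h101]
  simp only [List.foldl_cons]
  have h0 : pvInfMin none (some (f 0)) = some (f 0) := rfl
  rw [h0, foldl_infMin_some]
  congr 1
  apply foldl_min_eq
  · rw [hf 0 (by omega)]
    have := gd_le a 0 le_rfl (by omega)
    push_cast
    omega
  · intro k hk
    rcases List.mem_range'_1.mp hk with ⟨hk1, hk2⟩
    rw [hf k (by omega)]
    have := gd_le a (k : Int) (by exact_mod_cast Nat.zero_le k)
      (by exact_mod_cast (by omega : k ≤ 100))
    omega
  · -- attainment: at k = 0 when a ≤ 0 (then m = b), else at the clamp of a into [1,100]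
    by_cases ha : a ≤ 0
    · left
      rw [hf 0 (by omega)]
      push_cast
      have habs : |(0 : Int) - a| = -a := by rw [abs_of_nonneg (by omega)]; ring
      rw [habs]
      have : gd a = -a := by simp only [gd]; omega
      omega
    · right
      by_cases ha100 : a ≤ 100
      · refine ⟨a.toNat, List.mem_range'_1.mpr ⟨by omega, by omega⟩, ?_⟩
        rw [hf a.toNat (by omega)]
        rw [Int.toNat_of_nonneg (by omega : (0:Int) ≤ a)]
        have : gd a = 0 := by simp only [gd]; omega
        simp [this]
      · refine ⟨100, List.mem_range'_1.mpr ⟨by omega, by omega⟩, ?_⟩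
        rw [hf 100 (by omega)]
        push_cast
        have habs : |(100 : Int) - a| = a - 100 := by rw [abs_of_nonpos (by omega)]; ring
        have hg : gd a = a - 100 := by simp only [gd]; omega
        rw [habs, hg]

-- one DP row step: from a row of shape (c, a), the j-loop produces shape (c + gd a, ai)
set_option maxRecDepth 4096 in
lemma row_step (c a ai : Int) :
    ((List.range 101).map (fun (j : Nat) =>
      (List.range 101).foldl
        (fun cur (k : Nat) => pvInfMin cur (pvAddInf ((pvShape c a).getD k none) |(j : Int) - ai|)) none))
    = pvShape (c + gd a) ai := by
  have hR : pvShape (c + gd a) ai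
      = (List.range 101).map (fun (j : Nat) => some ((c + gd a) + |(j : Int) - ai|)) := rfl
  rw [hR]
  apply List.map_congr_left
  intro j hj
  have hfold : (List.range 101).foldl
      (fun cur (k : Nat) => pvInfMin cur (pvAddInf ((pvShape c a).getD k none) |(j : Int) - ai|)) none
      = (List.range 101).foldl
      (fun cur (k : Nat) => pvInfMin cur (some (c + |(k : Int) - a| + |(j : Int) - ai|))) none := by
    apply PySem.List.foldl_congr_mem
    intro acc k hk
    rw [pvShape_getD c a k (List.mem_range.mp hk)]
    rfl
  rw [hfold, foldl_shape_min (c + |(j : Int) - ai|) a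
      (fun k => c + |(k : Int) - a| + |(j : Int) - ai|) (fun k _ => by ring)]
  congr 1
  ring

-- the final min over a shaped row
lemma row_min (c a : Int) (row : List (Option Int)) (hrow : row = pvShape c a) :
    ((List.range 101).foldl (fun cur (j : Nat) => pvInfMin cur (row.getD j none)) none)
      = some (c + gd a) := by
  subst hrow
  have hfold : (List.range 101).foldl
      (fun cur (j : Nat) => pvInfMin cur ((pvShape c a).getD j none)) none
      = (List.range 101).foldl (fun cur (j : Nat) => pvInfMin cur (some (c + |(j : Int) - a|))) none := by
    apply PySem.List.foldl_congr_mem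
    intro acc j hj
    rw [pvShape_getD c a j (List.mem_range.mp hj)]
  rw [hfold]
  exact foldl_shape_min c a _ (fun k _ => rfl)

-- invariant of A's outer i-loop
lemma table_fold (arr : List Int) :
    ∀ (m i : Nat) (tbl : List (List (Option Int))), 1 ≤ i → i + m ≤ arr.length →
    tbl.length = i →
    tbl.getD (i - 1) [] = pvShape (pvSum arr (i - 1)) (pvArrAt arr (i - 1)) →
    ((List.range' i m).foldl
        (fun (tbl : List (List (Option Int))) (i : Nat) =>
          let ai := (PySem.List.pyGet? arr (i : Int)).getD 0
          let prev := tbl.getD (i - 1) []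
          tbl ++ [(List.range 101).map (fun (j : Nat) =>
            (List.range 101).foldl
              (fun cur (k : Nat) => pvInfMin cur (pvAddInf (prev.getD k none) |(j : Int) - ai|)) none)])
        tbl).length = i + m ∧
    ((List.range' i m).foldl
        (fun (tbl : List (List (Option Int))) (i : Nat) =>
          let ai := (PySem.List.pyGet? arr (i : Int)).getD 0
          let prev := tbl.getD (i - 1) []
          tbl ++ [(List.range 101).map (fun (j : Nat) =>
            (List.range 101).foldl
              (fun cur (k : Nat) => pvInfMin cur (pvAddInf (prev.getD k none) |(j : Int) - ai|)) none)])
        tbl).getD (i + m - 1) []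
      = pvShape (pvSum arr (i + m - 1)) (pvArrAt arr (i + m - 1)) := by
  intro m
  induction m with
  | zero =>
    intro i tbl h1 hlen htl hprev
    simpa using ⟨htl, hprev⟩
  | succ m ih =>
    intro i tbl h1 hlen htl hprev
    rw [List.range'_succ]
    simp only [List.foldl_cons]
    have hnewrow :
        ((List.range 101).map (fun (j : Nat) =>
          (List.range 101).foldl
            (fun cur (k : Nat) => pvInfMin cur (pvAddInf ((tbl.getD (i - 1) []).getD k none)
              |(j : Int) - (PySem.List.pyGet? arr (i : Int)).getD 0|)) none))
        = pvShape (pvSum arr i) (pvArrAt arr i) := by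
      rw [hprev, row_step]
      have hstep := pvSum_succ arr (i - 1) (by omega)
      have hi : i - 1 + 1 = i := by omega
      rw [hi] at hstep
      rw [← hstep]
      rfl
    have hlast : ((tbl ++ [pvShape (pvSum arr i) (pvArrAt arr i)]).getD i [])
        = pvShape (pvSum arr i) (pvArrAt arr i) := by
      simp [List.getD_eq_getElem?_getD, htl]
    have hres := ih (i + 1) (tbl ++ [pvShape (pvSum arr i) (pvArrAt arr i)])
        (by omega) (by omega) (by simp [htl]) (by simpa using hlast)
    simp only [hnewrow]
    constructor
    · have h := hres.1
      simp only [] at h ⊢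
      omega
    · have h := hres.2
      have he : i + 1 + m - 1 = i + (m + 1) - 1 := by omega
      rw [he] at h
      exact h

-- ===== VERDICT (by name: the statement is the Claim_ definition above) =====
theorem min_penalty_spec : Claim_equal_min_penalty := by
  intro size arr _ hpre
  unfold Spec_min_penalty min_penalty min_penalty_alt
  by_cases hs : size < 2
  · simp [hs]
  · have hlen : size ≤ (arr.length : Int) := by
      rcases hpre with h | h
      · omega
      · exact h
    simp only [if_neg hs]
    set n := size.toNat with hn
    have hn2 : 2 ≤ n := by omega
    have hnlen : n ≤ arr.length := by omega
    -- row0 is a shaped row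
    have hrow0 : ((List.range 101).map (fun (j : Nat) => some (|(PySem.List.pyGet? arr 0).getD 0 - (j : Int)|)))
        = pvShape (pvSum arr 0) (pvArrAt arr 0) := by
      unfold pvShape
      apply List.map_congr_left
      intro j _
      have h1 : pvSum arr 0 = 0 := by simp [pvSum]
      have h2 : pvArrAt arr 0 = (PySem.List.pyGet? arr 0).getD 0 := by
        simp [pvArrAt]
      rw [h1, zero_add, abs_sub_comm, h2]
    have htf := table_fold arr (n - 1) 1
        [(List.range 101).map (fun (j : Nat) => some (|(PySem.List.pyGet? arr 0).getD 0 - (j : Int)|))]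
        le_rfl (by omega) (by simp) (by simpa using hrow0)
    have hidx : 1 + (n - 1) - 1 = n - 1 := by omega
    rw [hidx] at htf
    rw [row_min _ _ _ htf.2]
    have hsum := pvSum_succ arr (n - 1) (by omega)
    have hidx2 : n - 1 + 1 = n := by omega
    rw [hidx2] at hsum
    rw [← hsum]
    -- B's side: slice = take n, and the mapped lambda is gd
    have hslice : PySem.List.slice arr (some 0) (some size) = arr.take n := by
      rw [PySem.List.slice_zero_start, PySem.List.slice_to arr (by omega), ← hn]
    rw [hslice]
    rfl
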